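-- pv_equiv track=rewrite | github.com/mboultoureau/advent-of-code | 2022/day9/part2.py | recalculateSize
-- ===== SOURCE A (Python) =====
-- def recalculateSize(top_left_corner, bottom_right_corner, H, knots):
--     # For H
--     if H[0] < top_left_corner[0]:
--         top_left_corner = (H[0], top_left_corner[1])
--
--     if H[0] > bottom_right_corner[0]:
--         bottom_right_corner = (H[0], bottom_right_corner[1])
--
--     if H[1] < top_left_corner[1]:
--         top_left_corner = (top_left_corner[0], H[1])
--
--     if H[1] > bottom_right_corner[1]:
--         bottom_right_corner = (bottom_right_corner[0], H[1])
--
--     # For T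
--     for T in knots:
--         if T[0] < top_left_corner[0]:
--             top_left_corner = (T[0], top_left_corner[1])
--
--         if T[0] > bottom_right_corner[0]:
--             bottom_right_corner = (T[0], bottom_right_corner[1])
--
--         if T[1] < top_left_corner[1]:
--             top_left_corner = (top_left_corner[0], T[1])
--
--         if T[1] > bottom_right_corner[1]:
--             bottom_right_corner = (bottom_right_corner[0], T[1])
--
--     return (top_left_corner, bottom_right_corner)
-- ===== SOURCE B (Python) =====
-- def recalculateSize(top_left_corner, bottom_right_corner, H, knots):
--     xs = sorted([H[0]] + [t[0] for t in knots])
--     ys = sorted([H[1]] + [t[1] for t in knots])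
--     return ((min(top_left_corner[0], xs[0]), min(top_left_corner[1], ys[0])),
--             (max(bottom_right_corner[0], xs[-1]), max(bottom_right_corner[1], ys[-1])))
-- ===== Notes on version B (the rewrite author's own statement) =====
-- stated objective: alternative
-- what changed: Instead of A's per-point conditional corner updates, B sorts each coordinate list ([H]+knots) once and reads the extremes off the sorted ends (xs[0]/xs[-1]), combining them with the incoming corners.
import Mathlib
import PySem

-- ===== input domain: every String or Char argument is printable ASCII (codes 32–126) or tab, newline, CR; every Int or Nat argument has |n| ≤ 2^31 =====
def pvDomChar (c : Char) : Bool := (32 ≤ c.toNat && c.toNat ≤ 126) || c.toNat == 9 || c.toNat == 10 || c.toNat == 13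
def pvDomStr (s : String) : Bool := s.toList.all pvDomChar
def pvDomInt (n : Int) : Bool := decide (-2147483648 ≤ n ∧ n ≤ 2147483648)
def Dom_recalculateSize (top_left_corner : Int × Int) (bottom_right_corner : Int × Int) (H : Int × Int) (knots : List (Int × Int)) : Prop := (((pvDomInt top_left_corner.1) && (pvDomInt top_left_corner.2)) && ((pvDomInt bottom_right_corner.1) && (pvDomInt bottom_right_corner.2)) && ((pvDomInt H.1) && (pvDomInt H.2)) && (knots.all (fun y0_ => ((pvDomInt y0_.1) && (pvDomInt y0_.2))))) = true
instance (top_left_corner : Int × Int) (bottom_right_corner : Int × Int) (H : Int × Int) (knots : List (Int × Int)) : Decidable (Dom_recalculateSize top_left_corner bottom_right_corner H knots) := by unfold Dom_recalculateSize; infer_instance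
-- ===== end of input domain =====

-- B replaces A's interleaved per-point conditional corner updates with sorting each coordinate
-- list once and reading off the extremes at the ends (objective: alternative).

-- ===== PORT A =====
-- one iteration of A's update logic (also used for the initial H block, which is the same four ifs)
def pvStepA (st : (Int × Int) × (Int × Int)) (T : Int × Int) : (Int × Int) × (Int × Int) :=
  let tl := st.1
  let br := st.2
  let tl := if T.1 < tl.1 then (T.1, tl.2) else tl
  let br := if T.1 > br.1 then (T.1, br.2) else br
  let tl := if T.2 < tl.2 then (tl.1, T.2) else tl
  let br := if T.2 > br.2 then (br.1, T.2) else br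
  (tl, br)

def recalculateSize (top_left_corner : Int × Int) (bottom_right_corner : Int × Int) (H : Int × Int) (knots : List (Int × Int)) : (Int × Int) × (Int × Int) :=
  knots.foldl pvStepA (pvStepA (top_left_corner, bottom_right_corner) H)

-- ===== PORT B =====
def recalculateSize_alt (top_left_corner : Int × Int) (bottom_right_corner : Int × Int) (H : Int × Int) (knots : List (Int × Int)) : (Int × Int) × (Int × Int) :=
  let xs := PySem.List.sorted (H.1 :: knots.map (fun t => t.1)) (fun x => x) false
  let ys := PySem.List.sorted (H.2 :: knots.map (fun t => t.2)) (fun x => x) false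
  -- xs and ys are nonempty (they contain H's coordinate), so the [0] and [-1] lookups
  -- always succeed; the .getD 0 default is never used
  ((min top_left_corner.1 ((PySem.List.pyGet? xs 0).getD 0),
    min top_left_corner.2 ((PySem.List.pyGet? ys 0).getD 0)),
   (max bottom_right_corner.1 ((PySem.List.pyGet? xs (-1)).getD 0),
    max bottom_right_corner.2 ((PySem.List.pyGet? ys (-1)).getD 0)))

-- ===== PRECONDITION & SPEC =====
def Spec_recalculateSize (top_left_corner : Int × Int) (bottom_right_corner : Int × Int) (H : Int × Int) (knots : List (Int × Int)) (out : (Int × Int) × (Int × Int)) : Prop := out = recalculateSize_alt top_left_corner bottom_right_corner H knots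
instance (top_left_corner : Int × Int) (bottom_right_corner : Int × Int) (H : Int × Int) (knots : List (Int × Int)) (out : (Int × Int) × (Int × Int)) : Decidable (Spec_recalculateSize top_left_corner bottom_right_corner H knots out) := by unfold Spec_recalculateSize; infer_instance

-- ===== CLAIM (what is proved, stated in full; the proofs are below) =====
def Claim_equal_recalculateSize : Prop := ∀ (top_left_corner : Int × Int) (bottom_right_corner : Int × Int) (H : Int × Int) (knots : List (Int × Int)), Dom_recalculateSize top_left_corner bottom_right_corner H knots → Spec_recalculateSize top_left_corner bottom_right_corner H knots (recalculateSize top_left_corner bottom_right_corner H knots)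

-- ===== LEMMAS AND PROOFS =====

-- A's four conditional updates compute the coordinatewise min/max with the point.
theorem pvStepA_minmax (st : (Int × Int) × (Int × Int)) (T : Int × Int) :
    pvStepA st T = ((min st.1.1 T.1, min st.1.2 T.2), (max st.2.1 T.1, max st.2.2 T.2)) := by
  rcases st with ⟨⟨a, b⟩, ⟨c, d⟩⟩
  rcases T with ⟨x, y⟩
  simp only [pvStepA]
  split_ifs <;> simp_all [min_def, max_def, Prod.ext_iff] <;> omega

theorem foldl_stepA (l : List (Int × Int)) (a b c d : Int) :
    l.foldl pvStepA ((a, b), (c, d)) =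
      ((l.foldl (fun m p => min m p.1) a, l.foldl (fun m p => min m p.2) b),
       (l.foldl (fun m p => max m p.1) c, l.foldl (fun m p => max m p.2) d)) := by
  induction l generalizing a b c d with
  | nil => rfl
  | cons t ts ih =>
      simp only [List.foldl_cons, pvStepA_minmax]
      exact ih _ _ _ _

theorem foldl_min_of_le (l : List Int) (a : Int) (h : ∀ y ∈ l, a ≤ y) : l.foldl min a = a := by
  induction l generalizing a with
  | nil => rfl
  | cons x xs ih =>
      simp only [List.foldl_cons]
      have hax : a ≤ x := h x (by simp)
      rw [min_eq_left hax]
      exact ih a (fun y hy => h y (by simp [hy]))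

theorem foldl_max_of_ge (l : List Int) (a : Int) (h : ∀ y ∈ l, y ≤ a) : l.foldl max a = a := by
  induction l generalizing a with
  | nil => rfl
  | cons x xs ih =>
      simp only [List.foldl_cons]
      have hax : x ≤ a := h x (by simp)
      rw [max_eq_left hax]
      exact ih a (fun y hy => h y (by simp [hy]))

theorem foldl_min_glb (l : List Int) (a m : Int) (hm : m ∈ l) (hle : ∀ y ∈ l, m ≤ y) :
    l.foldl min a = min a m := by
  induction l generalizing a with
  | nil => cases hm
  | cons x xs ih =>
      simp only [List.foldl_cons]
      by_cases hx : m ∈ xs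
      · rw [ih (min a x) hx (fun y hy => hle y (by simp [hy]))]
        have : m ≤ x := hle x (by simp)
        rw [min_assoc, min_eq_right this]
      · have hmx : m = x := by
          rcases List.mem_cons.mp hm with h | h
          · exact h
          · exact absurd h hx
        subst hmx
        rw [foldl_min_of_le xs (min a m) (fun y hy => le_trans (min_le_right a m) (hle y (by simp [hy])))]
  
theorem foldl_max_lub (l : List Int) (a m : Int) (hm : m ∈ l) (hge : ∀ y ∈ l, y ≤ m) :
    l.foldl max a = max a m := by
  induction l generalizing a with
  | nil => cases hm
  | cons x xs ih =>
      simp only [List.foldl_cons]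
      by_cases hx : m ∈ xs
      · rw [ih (max a x) hx (fun y hy => hge y (by simp [hy]))]
        have : x ≤ m := hge x (by simp)
        rw [max_assoc, max_eq_right this]
      · have hmx : m = x := by
          rcases List.mem_cons.mp hm with h | h
          · exact h
          · exact absurd h hx
        subst hmx
        rw [foldl_max_of_ge xs (max a m) (fun y hy => le_trans (hge y (by simp [hy])) (le_max_right a m))]

-- in a (≤)-pairwise list, the last element bounds every element from above
theorem pairwise_le_getLast (l : List Int) (hp : l.Pairwise (· ≤ ·)) (h : l ≠ []) :
    ∀ y ∈ l, y ≤ l.getLast h := by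
  induction l with
  | nil => cases h rfl
  | cons x xs ih =>
      intro y hy
      rcases List.pairwise_cons.mp hp with ⟨hx, hxs⟩
      cases xs with
      | nil => simp at hy; simp [hy, List.getLast]
      | cons z zs =>
          rw [List.getLast_cons (by simp)]
          rcases List.mem_cons.mp hy with h1 | h1
          · subst h1
            exact le_trans (hx _ (List.getLast_mem (by simp))) (le_refl _)
          · exact ih hxs (by simp) y h1

theorem pyGet?_zero (l : List Int) (x : Int) (t : List Int) (h : l = x :: t) :
    (PySem.List.pyGet? l 0).getD 0 = x := by
  subst h; simp [PySem.List.pyGet?, PySem.List.pyIdx?]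

theorem pyGet?_neg_one (l : List Int) (h : l ≠ []) :
    (PySem.List.pyGet? l (-1)).getD 0 = l.getLast h := by
  have hl : 0 < l.length := List.length_pos_iff.mpr h
  simp only [PySem.List.pyGet?, PySem.List.pyIdx?]
  rw [if_neg (by omega), if_pos (by omega)]
  simp only [Option.bind_some]
  rw [List.getLast_eq_getElem]
  rw [List.getElem?_eq_getElem (by omega)]
  simp

-- min over a nonempty list equals min with the head of its ascending sort
theorem foldl_min_sorted (l : List Int) (a : Int) (h : l ≠ []) :
    l.foldl min a = min a ((PySem.List.pyGet? (PySem.List.sorted l (fun x => x) false) 0).getD 0) := by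
  set s := PySem.List.sorted l (fun x => x) false with hs
  have hsne : s ≠ [] := by
    intro hnil
    exact h ((PySem.List.sorted_eq_nil_iff l (fun x => x) false).mp hnil)
  obtain ⟨m, t, hmt⟩ := List.exists_cons_of_ne_nil hsne
  have hperm := PySem.List.sorted_perm l (fun x => x) false
  have hmem : m ∈ l := hperm.mem_iff.mp (by rw [← hs, hmt]; simp)
  have hle : ∀ y ∈ l, m ≤ y := PySem.List.key_head_sorted_le l (fun x => x) (by rw [← hs]; exact hmt)
  rw [pyGet?_zero s m t hmt]
  exact foldl_min_glb l a m hmem hle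

-- max over a nonempty list equals max with the last element of its ascending sort
theorem foldl_max_sorted (l : List Int) (a : Int) (h : l ≠ []) :
    l.foldl max a = max a ((PySem.List.pyGet? (PySem.List.sorted l (fun x => x) false) (-1)).getD 0) := by
  set s := PySem.List.sorted l (fun x => x) false with hs
  have hsne : s ≠ [] := by
    intro hnil
    exact h ((PySem.List.sorted_eq_nil_iff l (fun x => x) false).mp hnil)
  have hperm := PySem.List.sorted_perm l (fun x => x) false
  have hpw : s.Pairwise (· ≤ ·) := PySem.List.sorted_pairwise l (fun x => x)
  have hmem : s.getLast hsne ∈ l := hperm.mem_iff.mp (List.getLast_mem hsne)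
  have hge : ∀ y ∈ l, y ≤ s.getLast hsne := fun y hy =>
    pairwise_le_getLast s hpw hsne y (hperm.mem_iff.mpr hy)
  rw [pyGet?_neg_one s hsne]
  exact foldl_max_lub l a _ hmem hge

-- ===== VERDICT (by name: the statement is the Claim_ definition above) =====
theorem recalculateSize_spec : Claim_equal_recalculateSize := by
  intro ⟨a, b⟩ ⟨c, d⟩ H knots _
  show _ = _
  simp only [recalculateSize, recalculateSize_alt, pvStepA_minmax, foldl_stepA]
  have hx : (H.1 :: knots.map (fun t => t.1)) ≠ [] := by simp
  have hy : (H.2 :: knots.map (fun t => t.2)) ≠ [] := by simp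
  have e1 := foldl_min_sorted (H.1 :: knots.map (fun t => t.1)) a hx
  have e2 := foldl_min_sorted (H.2 :: knots.map (fun t => t.2)) b hy
  have e3 := foldl_max_sorted (H.1 :: knots.map (fun t => t.1)) c hx
  have e4 := foldl_max_sorted (H.2 :: knots.map (fun t => t.2)) d hy
  simp only [List.foldl_cons, List.foldl_map] at e1 e2 e3 e4
  simp [e1, e2, e3, e4]
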